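-- pv_equiv track=rewrite | github.com/sixiangdeweicao/6Gen-optimization | patternMining.py | collect_var_pattern
-- ===== SOURCE A (Python) =====
-- def hexDistribution(IPs, index):
--     ret={}
--     for s in [IP[index] for IP in IPs]:
--         if s not in ret:
--             ret[s] = 1
--         else:
--             ret[s] += 1
--     retList = [[v, k] for k, v in ret.items()]
--     return retList
--
-- def get_var_position(pattern):
--     #获取pattern中x的下标
--     ret = []
--     for i, v in enumerate(pattern):
--         if v == 'x':
--             ret.append(i)
--     return ret
--
-- def collect_var_pattern(IPs, pattern):
--     # 检查pattern中可变的位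
--     var_index_list = get_var_position(pattern)
--     pattern = [s for s in pattern]
--     for i in var_index_list:
--         hD = hexDistribution(IPs, i)
--         if len(hD) == 1:
--             pattern[i] = hD[0][1]
--     return ''.join(pattern)
-- ===== SOURCE B (Python) =====
-- def collect_var_pattern(IPs, pattern):
--     # IP-major pass with a pruned candidate set instead of a per-position scan over all IPs
--     if not IPs:
--         return pattern
--     ref = IPs[0]
--     cand = [i for i, c in enumerate(pattern) if c == 'x']
--     for ip in IPs[1:]:
--         cand = [i for i in cand if ip[i] == ref[i]]
--     candset = set(cand)
--     return ''.join(ref[i] if i in candset else c for i, c in enumerate(pattern))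
-- ===== Notes on version B (the rewrite author's own statement) =====
-- stated objective: alternative
-- what changed: B inverts the traversal: instead of building a per-position hex histogram over all IPs for every variable position, it takes the first IP as reference and makes one IP-major pass that prunes a candidate list of variable positions, then writes the reference characters at the survivors.
import Mathlib
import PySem

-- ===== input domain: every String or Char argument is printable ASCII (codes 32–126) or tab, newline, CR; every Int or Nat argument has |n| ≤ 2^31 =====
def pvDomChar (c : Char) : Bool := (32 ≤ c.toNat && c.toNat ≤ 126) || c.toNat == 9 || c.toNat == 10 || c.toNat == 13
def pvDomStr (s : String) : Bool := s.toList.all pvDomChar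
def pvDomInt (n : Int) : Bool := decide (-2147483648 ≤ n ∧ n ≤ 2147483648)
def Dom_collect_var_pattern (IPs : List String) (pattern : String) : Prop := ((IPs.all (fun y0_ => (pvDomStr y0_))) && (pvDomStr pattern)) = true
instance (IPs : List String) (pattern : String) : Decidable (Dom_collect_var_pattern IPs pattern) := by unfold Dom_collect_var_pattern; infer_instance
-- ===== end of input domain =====

-- B replaces A's per-position hex histogram with one IP-major pruning pass over a candidate list (objective: alternative).
-- A raises IndexError when some IP is shorter than a variable position of the pattern; Pre_ excludes exactly those inputs.

-- ===== PORT A =====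
-- IP[index] raises IndexError when out of range; the '.getD ' '' default is only reached outside Pre_.
def hexDistribution (IPs : List String) (index : Int) : List (Int × Char) :=
  let chars := IPs.map (fun IP => (PySem.Str.pyGet? IP index).getD ' ')
  let d := chars.foldl
    (fun (d : PySem.Dict Char Int) s =>
      if d.contains s = false then d.insert s 1 else d.modify s 0 (· + 1))
    PySem.Dict.empty
  d.items.map (fun kv => (kv.2, kv.1))

def get_var_position (pattern : String) : List Int :=
  (PySem.List.enumerate pattern.toList 0).foldl
    (fun ret p => if p.2 = 'x' then ret ++ [p.1] else ret) []

def collect_var_pattern (IPs : List String) (pattern : String) : String :=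
  let var_index_list := get_var_position pattern
  let p :=
    var_index_list.foldl
      (fun (p : List Char) i =>
        let hD := hexDistribution IPs i
        if hD.length = 1 then PySem.List.pySetD p i ((PySem.List.pyGet? hD 0).getD (0, ' ')).2 else p)
      pattern.toList
  String.ofList p

-- ===== PORT B =====
-- ip[i]/ref[i] raise IndexError when out of range; '.getD' defaults are only reached outside Pre_.
def collect_var_pattern_alt (IPs : List String) (pattern : String) : String :=
  match IPs with
  | [] => pattern
  | ref :: rest =>
    let cand0 : List Int :=
      (PySem.List.enumerate pattern.toList 0).filterMap
        (fun p => if p.2 = 'x' then some p.1 else none)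
    let cand := rest.foldl
      (fun c ip => c.filter (fun i => PySem.Str.pyGet? ip i == PySem.Str.pyGet? ref i)) cand0
    let candset : PySem.Set Int := PySem.Set.ofList cand
    String.ofList ((PySem.List.enumerate pattern.toList 0).map
      (fun p => if candset.contains p.1 then (PySem.Str.pyGet? ref p.1).getD p.2 else p.2))

-- ===== PRECONDITION & SPEC =====
-- Pre_: every IP is long enough at every 'x' position of the pattern (otherwise A raises IndexError).
def Pre_collect_var_pattern (IPs : List String) (pattern : String) : Prop :=
  ∀ IP ∈ IPs, ∀ i ∈ List.range pattern.toList.length,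
    pattern.toList[i]? = some 'x' → i < IP.toList.length
instance (IPs : List String) (pattern : String) : Decidable (Pre_collect_var_pattern IPs pattern) := by
  unfold Pre_collect_var_pattern; infer_instance

def pvWitness_collect_var_pattern : List String × String := (["ab", "ax"], "xx")

def Spec_collect_var_pattern (IPs : List String) (pattern : String) (out : String) : Prop :=
  out = collect_var_pattern_alt IPs pattern
instance (IPs : List String) (pattern : String) (out : String) : Decidable (Spec_collect_var_pattern IPs pattern out) := by
  unfold Spec_collect_var_pattern; infer_instance

-- ===== CLAIM (what is proved, stated in full; the proofs are below) =====
def Claim_equal_collect_var_pattern : Prop := ∀ (IPs : List String) (pattern : String), Dom_collect_var_pattern IPs pattern → Pre_collect_var_pattern IPs pattern → Spec_collect_var_pattern IPs pattern (collect_var_pattern IPs pattern)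

-- ===== LEMMAS AND PROOFS =====

-- the variable positions as a filterMap (shape of A's append-fold)
theorem pv_foldl_append_if (l : List (Int × Char)) (acc : List Int) :
    l.foldl (fun ret p => if p.2 = 'x' then ret ++ [p.1] else ret) acc
      = acc ++ l.filterMap (fun p => if p.2 = 'x' then some p.1 else none) := by
  induction l generalizing acc with
  | nil => simp
  | cons p l ih =>
    rw [List.foldl_cons, ih, List.filterMap_cons]
    by_cases h : p.2 = 'x' <;> simp [h]

theorem pv_mem_varpos (cs : List Char) (i : Int) :
    i ∈ (PySem.List.enumerate cs 0).filterMap (fun p => if p.2 = 'x' then some p.1 else none)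
      ↔ ∃ (k : Nat) (h : k < cs.length), i = (k : Int) ∧ cs[k] = 'x' := by
  simp only [List.mem_filterMap, PySem.List.mem_enumerate_iff]
  constructor
  · rintro ⟨p, ⟨k, hk, rfl⟩, hif⟩
    simp only at hif
    by_cases hx : cs[k] = 'x'
    · rw [if_pos hx] at hif
      refine ⟨k, hk, ?_, hx⟩
      injection hif with h
      omega
    · rw [if_neg hx] at hif
      exact absurd hif (by simp)
  · rintro ⟨k, hk, rfl, hx⟩
    refine ⟨((0 : Int) + (k : Int), cs[k]), ⟨k, hk, rfl⟩, ?_⟩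
    simp [hx]

-- keys of A's counting fold are the distinct chars in first-occurrence order
theorem pv_keys_countFold (chars : List Char) (d : PySem.Dict Char Int) :
    (chars.foldl
      (fun (d : PySem.Dict Char Int) s =>
        if d.contains s = false then d.insert s 1 else d.modify s 0 (· + 1)) d).keys
      = PySem.Set.update d.keys chars := by
  induction chars generalizing d with
  | nil => simp [PySem.Set.update]
  | cons s l ih =>
    rw [List.foldl_cons, ih, PySem.Set.update_cons]
    congr 1
    by_cases h : d.contains s = false
    · rw [if_pos h, PySem.Dict.keys_insert_of_not_contains _ _ h,
        PySem.Set.add_of_not_mem]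
      intro hm
      rw [← PySem.Dict.contains_iff_mem_keys] at hm
      simp [hm] at h
    · have h' : d.contains s = true := by simpa using h
      rw [if_neg h, PySem.Dict.keys_modify, PySem.Dict.keys_insert_of_contains _ _ h',
        PySem.Set.add_of_mem ((PySem.Dict.contains_iff_mem_keys d s).1 h')]

theorem pv_discard_eq_nil_iff {s : PySem.Set Char} {c : Char} :
    PySem.Set.discard s c = [] ↔ ∀ y ∈ s, y = c := by
  rw [List.eq_nil_iff_forall_not_mem]
  constructor
  · intro h y hy
    by_contra hne
    exact h y ((PySem.Set.mem_discard s c y).2 ⟨hy, hne⟩)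
  · intro h y hy
    obtain ⟨hy1, hy2⟩ := (PySem.Set.mem_discard s c y).1 hy
    exact hy2 (h y hy1)

-- abbreviation for the character A reads at position i of an IP (exact where in range)
def pvCharAt (ip : String) (i : Int) : Char := (PySem.Str.pyGet? ip i).getD ' '

theorem pv_hD_items_keys (ref : String) (rest : List String) (i : Int) :
    (hexDistribution (ref :: rest) i).map (fun q => q.2)
      = PySem.Set.ofList (pvCharAt ref i :: rest.map (fun IP => pvCharAt IP i)) := by
  show ((((ref :: rest).map (fun IP => (PySem.Str.pyGet? IP i).getD ' ')).foldl
      (fun (d : PySem.Dict Char Int) s =>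
        if d.contains s = false then d.insert s 1 else d.modify s 0 (· + 1))
      PySem.Dict.empty).items.map (fun kv => (kv.2, kv.1))).map (fun q => q.2) = _
  rw [List.map_map]
  have : ((((ref :: rest).map (fun IP => (PySem.Str.pyGet? IP i).getD ' ')).foldl
      (fun (d : PySem.Dict Char Int) s =>
        if d.contains s = false then d.insert s 1 else d.modify s 0 (· + 1))
      PySem.Dict.empty)).keys
      = PySem.Set.update (PySem.Dict.empty : PySem.Dict Char Int).keys
          ((ref :: rest).map (fun IP => (PySem.Str.pyGet? IP i).getD ' ')) :=
    pv_keys_countFold _ _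
  have he : (PySem.Dict.empty : PySem.Dict Char Int).keys = PySem.Set.empty := rfl
  rw [he, PySem.Set.update_empty] at this
  exact this

theorem pv_cond_iff (ref : String) (rest : List String) (i : Int) :
    (hexDistribution (ref :: rest) i).length = 1
      ↔ ∀ ip ∈ rest, pvCharAt ip i = pvCharAt ref i := by
  have h := pv_hD_items_keys ref rest i
  have hlen : (hexDistribution (ref :: rest) i).length
      = (PySem.Set.ofList (pvCharAt ref i :: rest.map (fun IP => pvCharAt IP i))).length := by
    rw [← h, List.length_map]
  rw [hlen, PySem.Set.ofList_cons, List.length_cons]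
  constructor
  · intro hl
    have hnil : (PySem.Set.ofList (rest.map (fun IP => pvCharAt IP i))).discard (pvCharAt ref i) = [] := by
      have := Nat.succ_injective hl
      exact List.eq_nil_of_length_eq_zero this
    intro ip hip
    have := pv_discard_eq_nil_iff.1 hnil (pvCharAt ip i)
      ((PySem.Set.mem_ofList _ _).2 (List.mem_map_of_mem hip))
    exact this
  · intro hall
    have : (PySem.Set.ofList (rest.map (fun IP => pvCharAt IP i))).discard (pvCharAt ref i) = [] := by
      rw [pv_discard_eq_nil_iff]
      intro y hy
      obtain ⟨ip, hip, rfl⟩ := List.mem_map.1 ((PySem.Set.mem_ofList _ _).1 hy)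
      exact hall ip hip
    rw [this]
    simp

-- the value A writes at a fixed position is the reference IP's character
theorem pv_val_eq (ref : String) (rest : List String) (i : Int)
    (h1 : (hexDistribution (ref :: rest) i).length = 1) :
    ((PySem.List.pyGet? (hexDistribution (ref :: rest) i) 0).getD (0, ' ')).2
      = pvCharAt ref i := by
  obtain ⟨q, hq⟩ := List.length_eq_one_iff.1 h1
  have h := pv_hD_items_keys ref rest i
  rw [hq] at h
  rw [PySem.Set.ofList_cons] at h
  simp only [List.map_cons, List.map_nil] at h
  have : q.2 = pvCharAt ref i := (List.cons.injEq _ _ _ _ ▸ h).1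
  rw [hq]
  simpa [PySem.List.pyGet?_zero_cons] using this

-- membership in B's pruned candidate list
theorem pv_mem_filterFold (rest : List String) (ref : String) (c : List Int) (i : Int) :
    i ∈ rest.foldl
        (fun c ip => c.filter (fun i => PySem.Str.pyGet? ip i == PySem.Str.pyGet? ref i)) c
      ↔ i ∈ c ∧ ∀ ip ∈ rest, (PySem.Str.pyGet? ip i == PySem.Str.pyGet? ref i) = true := by
  induction rest generalizing c with
  | nil => simp
  | cons ip rest ih =>
    rw [List.foldl_cons, ih, List.mem_filter]
    constructor
    · rintro ⟨⟨h1, h2⟩, h3⟩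
      refine ⟨h1, fun ip' hip' => ?_⟩
      rcases List.mem_cons.1 hip' with rfl | hmem
      · exact h2
      · exact h3 ip' hmem
    · rintro ⟨h1, h2⟩
      exact ⟨⟨h1, h2 ip (List.mem_cons_self)⟩, fun ip' hip' => h2 ip' (List.mem_cons_of_mem _ hip')⟩

-- A's assignment loop, read back per index
theorem pv_foldl_setIf_getElem? (cond : Int → Prop) [DecidablePred cond] (val : Int → Char)
    (L : List Int) (p : List Char) (k : Nat)
    (hL : ∀ i ∈ L, ∃ m : Nat, i = (m : Int) ∧ m < p.length) :
    (L.foldl (fun p i => if cond i then PySem.List.pySetD p i (val i) else p) p)[k]?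
      = if (k : Int) ∈ L ∧ cond (k : Int) then some (val (k : Int)) else p[k]? := by
  induction L generalizing p with
  | nil => simp
  | cons i L ih =>
    obtain ⟨m, rfl, hm⟩ := hL i (List.mem_cons_self)
    rw [List.foldl_cons]
    set p' := if cond (m : Int) then PySem.List.pySetD p (m : Int) (val (m : Int)) else p with hp'
    have hplen : p'.length = p.length := by
      rw [hp']; split <;> simp
    have hlen : ∀ j ∈ L, ∃ m' : Nat, j = (m' : Int) ∧ m' < p'.length := by
      intro j hj
      obtain ⟨m', hj', hm'⟩ := hL j (List.mem_cons_of_mem _ hj)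
      exact ⟨m', hj', by omega⟩
    rw [ih p' hlen]
    have hp'k : p'[k]? = if (k : Int) = (m : Int) ∧ cond (k : Int) then some (val (k : Int)) else p[k]? := by
      by_cases he : (k : Int) = (m : Int)
      · have hkm : k = m := by exact_mod_cast he
        subst hkm
        by_cases hc : cond (k : Int)
        · rw [if_pos ⟨rfl, hc⟩, hp', if_pos hc, PySem.List.pySetD_natCast]
          simp [hm]
        · rw [if_neg (fun h => hc h.2), hp', if_neg hc]
      · have hkm : k ≠ m := fun h => he (by exact_mod_cast h)
        rw [if_neg (fun h => he h.1), hp']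
        split
        · rw [PySem.List.pySetD_natCast, List.getElem?_set_ne (fun h => hkm h.symm)]
        · rfl
    by_cases hc : cond (k : Int)
    · by_cases hmem : (k : Int) ∈ L
      · simp [hmem, hc]
      · by_cases he : (k : Int) = (m : Int)
        · rw [if_neg (fun h => hmem h.1), hp'k, if_pos ⟨he, hc⟩,
            if_pos ⟨List.mem_cons.2 (Or.inl he), hc⟩]
        · rw [if_neg (fun h => hmem h.1), hp'k, if_neg (fun h => he h.1),
            if_neg (fun h => (List.mem_cons.1 h.1).elim he hmem)]
    · simp [hc, hp'k]

-- characters at a variable position are in range for every IP, so pyGet? is 'some'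
theorem pv_pyGet?_some (ip : String) (k : Nat) (h : k < ip.toList.length) :
    PySem.Str.pyGet? ip (k : Int) = some ip.toList[k] := by
  rw [PySem.Str.pyGet?_natCast, List.getElem?_eq_getElem h]

theorem collect_var_pattern_spec : Claim_equal_collect_var_pattern := by
  intro IPs pattern _hDom hPre
  unfold Spec_collect_var_pattern
  cases IPs with
  | nil =>
    have hfold : ∀ (L : List Int) (p : List Char),
        L.foldl (fun (p : List Char) (i : Int) =>
          let hD := hexDistribution [] i
          if hD.length = 1 then
            PySem.List.pySetD p i ((PySem.List.pyGet? hD 0).getD (0, ' ')).2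
          else p) p = p := by
      intro L
      induction L with
      | nil => intro p; rfl
      | cons i L ih =>
        intro p
        rw [List.foldl_cons]
        have h0 : hexDistribution [] i = [] := rfl
        simp only [h0, List.length_nil]
        rw [if_neg (by omega)]
        exact ih p
    show collect_var_pattern [] pattern = collect_var_pattern_alt [] pattern
    rw [collect_var_pattern, collect_var_pattern_alt]
    rw [hfold, String.ofList_toList]
  | cons ref rest =>
    show collect_var_pattern (ref :: rest) pattern = collect_var_pattern_alt (ref :: rest) pattern
    have hpre : ∀ ip ∈ ref :: rest, ∀ k : Nat, k < pattern.toList.length →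
        pattern.toList[k]? = some 'x' → k < ip.toList.length := by
      intro ip hip k hk hx
      exact hPre ip hip k (List.mem_range.2 hk) hx
    rw [collect_var_pattern, collect_var_pattern_alt]
    rw [get_var_position, pv_foldl_append_if, List.nil_append]
    refine congrArg String.ofList (List.ext_getElem? fun k => ?_)
    rw [pv_foldl_setIf_getElem?
        (fun i => (hexDistribution (ref :: rest) i).length = 1)
        (fun i => ((PySem.List.pyGet? (hexDistribution (ref :: rest) i) 0).getD (0, ' ')).2)
        _ _ k
        (fun i hi => by
          obtain ⟨m, hm, rfl, _⟩ := (pv_mem_varpos pattern.toList i).1 hi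
          exact ⟨m, rfl, hm⟩)]
    rw [List.getElem?_map, PySem.List.getElem?_enumerate]
    by_cases hk : k < pattern.toList.length
    · rw [List.getElem?_eq_getElem hk]
      simp only [Option.map_some, zero_add]
      by_cases hx : pattern.toList[k] = 'x'
      · -- variable position
        have hv : (k : Int) ∈ (PySem.List.enumerate pattern.toList 0).filterMap
            (fun p => if p.2 = 'x' then some p.1 else none) :=
          (pv_mem_varpos pattern.toList (k : Int)).2 ⟨k, hk, rfl, hx⟩
        have hxk : pattern.toList[k]? = some 'x' := by
          rw [List.getElem?_eq_getElem hk, hx]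
        have hlen : ∀ ip ∈ ref :: rest, k < ip.toList.length :=
          fun ip hip => hpre ip hip k hk hxk
        have hrk : k < ref.toList.length := hlen ref List.mem_cons_self
        have hrefsome := pv_pyGet?_some ref k hrk
        have hbridge : ∀ ip ∈ rest,
            ((PySem.Str.pyGet? ip (k : Int) == PySem.Str.pyGet? ref (k : Int)) = true
              ↔ pvCharAt ip (k : Int) = pvCharAt ref (k : Int)) := by
          intro ip hip
          have hipsome := pv_pyGet?_some ip k (hlen ip (List.mem_cons_of_mem _ hip))
          rw [pvCharAt, pvCharAt, hipsome, hrefsome]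
          simp
        have hcond : ((hexDistribution (ref :: rest) (k : Int)).length = 1)
            ↔ (k : Int) ∈ rest.foldl
                (fun c ip => c.filter (fun i => PySem.Str.pyGet? ip i == PySem.Str.pyGet? ref i))
                ((PySem.List.enumerate pattern.toList 0).filterMap
                  (fun p => if p.2 = 'x' then some p.1 else none)) := by
          rw [pv_cond_iff, pv_mem_filterFold]
          constructor
          · intro h
            exact ⟨hv, fun ip hip => (hbridge ip hip).2 (h ip hip)⟩
          · intro h ip hip
            exact (hbridge ip hip).1 (h.2 ip hip)
        by_cases hc : (hexDistribution (ref :: rest) (k : Int)).length = 1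
        · rw [if_pos ⟨hv, hc⟩]
          have hcontains : (PySem.Set.ofList (rest.foldl
              (fun c ip => c.filter (fun i => PySem.Str.pyGet? ip i == PySem.Str.pyGet? ref i))
              ((PySem.List.enumerate pattern.toList 0).filterMap
                (fun p => if p.2 = 'x' then some p.1 else none)))).contains (k : Int) = true := by
            rw [PySem.Set.contains_iff, PySem.Set.mem_ofList]
            exact hcond.1 hc
          rw [if_pos hcontains]
          rw [pv_val_eq ref rest (k : Int) hc, pvCharAt, hrefsome]
          rfl
        · rw [if_neg (fun h => hc h.2)]
          have hcontains : (PySem.Set.ofList (rest.foldl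
              (fun c ip => c.filter (fun i => PySem.Str.pyGet? ip i == PySem.Str.pyGet? ref i))
              ((PySem.List.enumerate pattern.toList 0).filterMap
                (fun p => if p.2 = 'x' then some p.1 else none)))).contains (k : Int) ≠ true := by
            intro h
            rw [PySem.Set.contains_iff, PySem.Set.mem_ofList] at h
            exact hc (hcond.2 h)
          rw [if_neg hcontains]
      · -- fixed position: neither side touches it
        have hnv : (k : Int) ∉ (PySem.List.enumerate pattern.toList 0).filterMap
            (fun p => if p.2 = 'x' then some p.1 else none) := by
          intro hkv
          obtain ⟨m, hm, hkm, hxm⟩ := (pv_mem_varpos pattern.toList (k : Int)).1 hkv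
          have : k = m := by exact_mod_cast hkm
          exact hx (this ▸ hxm)
        rw [if_neg (fun h => hnv h.1)]
        have hcontains : (PySem.Set.ofList (rest.foldl
            (fun c ip => c.filter (fun i => PySem.Str.pyGet? ip i == PySem.Str.pyGet? ref i))
            ((PySem.List.enumerate pattern.toList 0).filterMap
              (fun p => if p.2 = 'x' then some p.1 else none)))).contains (k : Int) ≠ true := by
          intro h
          rw [PySem.Set.contains_iff, PySem.Set.mem_ofList, pv_mem_filterFold] at h
          exact hnv h.1
        rw [if_neg hcontains]
    · -- out of range: both none
      have hnv : (k : Int) ∉ (PySem.List.enumerate pattern.toList 0).filterMap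
          (fun p => if p.2 = 'x' then some p.1 else none) := by
        intro hkv
        obtain ⟨m, hm, hkm, _⟩ := (pv_mem_varpos pattern.toList (k : Int)).1 hkv
        have : k = m := by exact_mod_cast hkm
        omega
      rw [if_neg (fun h => hnv h.1)]
      rw [List.getElem?_eq_none (by omega)]
      rfl
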